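-- pv_equiv track=rewrite | github.com/dvdmarchetti/hackerrank-challenges | Interview Preparation Kit/Miscellaneous/Friend Circle Queries/solve.py | maxCircle
-- ===== SOURCE A (Python) =====
-- class UnionSet:
--     def __init__(self):
--         self.parent = {}
--         self.sizes = {}
--         self.max_size = 1
--
--     def make_set(self, v):
--         if v not in self.parent:
--             self.parent[v] = v
--             self.sizes[v] = 1
--
--     def find_set(self, v):
--         if v == self.parent[v]:
--             return v
--
--         self.parent[v] = self.find_set(self.parent[v])
--         return self.parent[v];
--
--     def union(self, source, target):
--         source = self.find_set(source);
--         target = self.find_set(target);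
--
--         if source != target:
--             if self.sizes[source] < self.sizes[target]:
--                 source, target = target, source
--
--             self.parent[target] = source
--             self.sizes[source] += self.sizes[target]
--             if self.sizes[source] > self.max_size:
--                 self.max_size = self.sizes[source]
--
-- def maxCircle(queries):
--     A = UnionSet()
--     output = []
--
--     for source, target in queries:
--         A.make_set(source)
--         A.make_set(target)
--         A.union(source, target)
--
--         output.append(A.max_size)
--
--     return output
-- ===== SOURCE B (Python) =====
-- def maxCircle(queries):
--     # quick-find: every node maps straight to its component id; merge relabels
--     # the smaller component, so there is no parent forest and no recursion.
--     comp = {}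
--     size = {}
--     best = 1
--     output = []
--     for source, target in queries:
--         if source not in comp:
--             comp[source] = source
--             size[source] = 1
--         if target not in comp:
--             comp[target] = target
--             size[target] = 1
--         s, t = comp[source], comp[target]
--         if s != t:
--             if size[s] < size[t]:
--                 s, t = t, s
--             comp = {k: (s if c == t else c) for k, c in comp.items()}
--             size[s] += size[t]
--             if size[s] > best:
--                 best = size[s]
--         output.append(best)
--     return output
-- ===== Notes on version B (the rewrite author's own statement) =====
-- stated objective: alternative
-- what changed: Replaced the parent-pointer union-find tree with recursive path-compressed find by a quick-find scheme: a flat node-to-component-id dict plus a size dict, merging by relabeling every member of the smaller component in one comprehension pass, so there is no forest and no recursion.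
import Mathlib
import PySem

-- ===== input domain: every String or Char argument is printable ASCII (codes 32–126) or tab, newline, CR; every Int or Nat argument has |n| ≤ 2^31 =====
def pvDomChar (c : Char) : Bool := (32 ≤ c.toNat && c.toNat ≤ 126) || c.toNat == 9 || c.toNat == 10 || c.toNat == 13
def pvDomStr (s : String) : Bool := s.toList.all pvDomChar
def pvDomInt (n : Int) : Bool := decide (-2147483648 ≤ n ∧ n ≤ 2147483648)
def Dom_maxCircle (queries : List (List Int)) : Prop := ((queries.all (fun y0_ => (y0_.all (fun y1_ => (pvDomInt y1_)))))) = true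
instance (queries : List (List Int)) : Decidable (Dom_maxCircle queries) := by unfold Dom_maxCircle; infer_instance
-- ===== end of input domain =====

-- B replaces A's path-compressed union-find forest by quick-find (node -> component id,
-- relabel the smaller component on merge); same outputs, similar cost (objective: alternative).

-- ===== PORT A =====
-- A's recursive find_set is ported with fuel parent.size+1; on the forests maxCircle
-- builds a root is always reached within that fuel (proved below), so the fuel
-- fallback branches are never taken.
def pvFindSet : Nat → PySem.Dict Int Int → Int → Int × PySem.Dict Int Int
  | 0, p, v => (v, p)
  | Nat.succ fuel, p, v =>
    match p.get? v with
    | none => (v, p)          -- Python KeyError: unreachable from maxCircle (find after make_set)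
    | some w =>
      if w = v then (v, p)
      else
        let r := pvFindSet fuel p w
        (r.1, r.2.insert v r.1)

-- make_set: if v not in parent: parent[v] = v; sizes[v] = 1
def pvMakeSet (p s : PySem.Dict Int Int) (v : Int) :
    PySem.Dict Int Int × PySem.Dict Int Int :=
  if p.contains v then (p, s) else (p.insert v v, s.insert v 1)

-- union(source, target) acting on (parent, sizes, max_size); sizes lookups use getD 0,
-- exact here because the looked-up keys are always present on reachable states
def pvUnionA (p s : PySem.Dict Int Int) (m : Int) (a b : Int) :
    PySem.Dict Int Int × PySem.Dict Int Int × Int :=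
  let f1 := pvFindSet (p.size + 1) p a
  let f2 := pvFindSet (f1.2.size + 1) f1.2 b
  if f1.1 ≠ f2.1 then
    let st := if s.getD f1.1 0 < s.getD f2.1 0 then (f2.1, f1.1) else (f1.1, f2.1)
    let ns := s.getD st.1 0 + s.getD st.2 0
    (f2.2.insert st.2 st.1, s.insert st.1 ns, if ns > m then ns else m)
  else (f2.2, s, m)

def pvStepA (st : (PySem.Dict Int Int × PySem.Dict Int Int × Int) × List Int)
    (q : List Int) : (PySem.Dict Int Int × PySem.Dict Int Int × Int) × List Int :=
  match q with
  | [source, target] =>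
    let ms1 := pvMakeSet st.1.1 st.1.2.1 source
    let ms2 := pvMakeSet ms1.1 ms1.2 target
    let u := pvUnionA ms2.1 ms2.2 st.1.2.2 source target
    (u, st.2 ++ [u.2.2])
  | _ => st                   -- tuple unpacking raises in Python: outside Pre_

def maxCircle (queries : List (List Int)) : List Int :=
  (queries.foldl pvStepA ((PySem.Dict.empty, PySem.Dict.empty, 1), [])).2

-- ===== PORT B =====
-- comp = {k: (s if c == t else c) for k, c in comp.items()}
def pvRelabel (c : PySem.Dict Int Int) (t s : Int) : PySem.Dict Int Int :=
  PySem.Dict.mk (c.items.map (fun kv => (kv.1, if kv.2 == t then s else kv.2)))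

-- if v not in comp: comp[v] = v; size[v] = 1
def pvRegister (c z : PySem.Dict Int Int) (v : Int) :
    PySem.Dict Int Int × PySem.Dict Int Int :=
  if c.contains v then (c, z) else (c.insert v v, z.insert v 1)

def pvStepB (st : (PySem.Dict Int Int × PySem.Dict Int Int × Int) × List Int)
    (q : List Int) : (PySem.Dict Int Int × PySem.Dict Int Int × Int) × List Int :=
  match q with
  | [source, target] =>
    let r1 := pvRegister st.1.1 st.1.2.1 source
    let r2 := pvRegister r1.1 r1.2 target
    let s := r2.1.getD source 0   -- comp[source]: key present, just registered
    let t := r2.1.getD target 0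
    if s ≠ t then
      let st2 := if r2.2.getD s 0 < r2.2.getD t 0 then (t, s) else (s, t)
      let ns := r2.2.getD st2.1 0 + r2.2.getD st2.2 0
      let b2 := if ns > st.1.2.2 then ns else st.1.2.2
      ((pvRelabel r2.1 st2.2 st2.1, r2.2.insert st2.1 ns, b2), st.2 ++ [b2])
    else ((r2.1, r2.2, st.1.2.2), st.2 ++ [st.1.2.2])
  | _ => st                   -- tuple unpacking raises in Python: outside Pre_

def maxCircle_alt (queries : List (List Int)) : List Int :=
  (queries.foldl pvStepB ((PySem.Dict.empty, PySem.Dict.empty, 1), [])).2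

-- ===== PRECONDITION & SPEC =====
-- Pre_ excludes exactly the queries that are not two-element lists, on which
-- Python's tuple unpacking 'for source, target in queries' raises ValueError.
def Pre_maxCircle (queries : List (List Int)) : Prop :=
  ∀ q ∈ queries, q.length = 2
instance (queries : List (List Int)) : Decidable (Pre_maxCircle queries) := by
  unfold Pre_maxCircle; infer_instance
def pvWitness_maxCircle : List (List Int) := [[1, 2], [3, 4], [2, 3], [1, 1]]

def Spec_maxCircle (queries : List (List Int)) (out : List Int) : Prop := out = maxCircle_alt queries
instance (queries : List (List Int)) (out : List Int) : Decidable (Spec_maxCircle queries out) := by unfold Spec_maxCircle; infer_instance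

-- ===== CLAIM (what is proved, stated in full; the proofs are below) =====
def Claim_equal_maxCircle : Prop := ∀ (queries : List (List Int)), Dom_maxCircle queries → Pre_maxCircle queries → Spec_maxCircle queries (maxCircle queries)

-- ===== LEMMAS AND PROOFS =====

-- Reaching the root of A's parent forest, relationally: pvRootF n p v follows
-- parent pointers for at most n steps and returns the self-parent it reaches.
def pvRootF : Nat → PySem.Dict Int Int → Int → Option Int
  | 0, _, _ => none
  | Nat.succ n, p, v =>
    match p.get? v with
    | none => none
    | some w => if w = v then some v else pvRootF n p w

def pvR (p : PySem.Dict Int Int) (v r : Int) : Prop := ∃ n, pvRootF n p v = some r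

lemma pvRootF_succ {p : PySem.Dict Int Int} {v w : Int} (n : Nat) (h : p.get? v = some w) :
    pvRootF (n + 1) p v = if w = v then some v else pvRootF n p w := by
  simp [pvRootF, h]

lemma pvRootF_succ_none {p : PySem.Dict Int Int} {v : Int} (n : Nat) (h : p.get? v = none) :
    pvRootF (n + 1) p v = none := by
  simp [pvRootF, h]

lemma pvRootF_mono (p : PySem.Dict Int Int) :
    ∀ n m (v r : Int), n ≤ m → pvRootF n p v = some r → pvRootF m p v = some r := by
  intro n
  induction n with
  | zero => intro m v r _ h; simp [pvRootF] at h
  | succ k ih =>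
    intro m v r hle h
    obtain ⟨m', rfl⟩ : ∃ m', m = m' + 1 := ⟨m - 1, by omega⟩
    cases hg : p.get? v with
    | none => simp [pvRootF, hg] at h
    | some w =>
      by_cases hw : w = v
      · simpa [pvRootF, hg, hw] using h
      · simp only [pvRootF, hg, if_neg hw] at h ⊢
        exact ih m' w r (by omega) h

lemma pvR_det {p : PySem.Dict Int Int} {v r r' : Int} (h : pvR p v r) (h' : pvR p v r') :
    r = r' := by
  obtain ⟨n, hn⟩ := h
  obtain ⟨m, hm⟩ := h'
  have h1 := pvRootF_mono p n (Nat.max n m) v r (Nat.le_max_left n m) hn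
  have h2 := pvRootF_mono p m (Nat.max n m) v r' (Nat.le_max_right n m) hm
  rw [h1] at h2
  exact Option.some.inj h2

lemma pvR_mem {p : PySem.Dict Int Int} {v r : Int} (h : pvR p v r) :
    (p.get? v).isSome := by
  obtain ⟨n, hn⟩ := h
  cases n with
  | zero => simp [pvRootF] at hn
  | succ k =>
    cases hg : p.get? v with
    | none => simp [pvRootF, hg] at hn
    | some w => simp

lemma pvR_root {p : PySem.Dict Int Int} {v r : Int} (h : pvR p v r) :
    p.get? r = some r := by
  obtain ⟨n, hn⟩ := h
  induction n generalizing v with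
  | zero => simp [pvRootF] at hn
  | succ k ih =>
    cases hg : p.get? v with
    | none => simp [pvRootF, hg] at hn
    | some w =>
      by_cases hw : w = v
      · simp [pvRootF, hg, hw] at hn
        subst hn
        rw [hw] at hg; exact hg
      · simp only [pvRootF, hg, if_neg hw] at hn
        exact ih hn

lemma pvR_self {p : PySem.Dict Int Int} {v : Int} (h : p.get? v = some v) : pvR p v v :=
  ⟨1, by simp [pvRootF, h]⟩

lemma pvR_step {p : PySem.Dict Int Int} {v w r : Int} (h : p.get? v = some w) (hne : w ≠ v) :
    (pvR p v r ↔ pvR p w r) := by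
  constructor
  · rintro ⟨n, hn⟩
    cases n with
    | zero => simp [pvRootF] at hn
    | succ k =>
      simp only [pvRootF, h, if_neg hne] at hn
      exact ⟨k, hn⟩
  · rintro ⟨n, hn⟩
    exact ⟨n + 1, by simp only [pvRootF, h, if_neg hne]; exact hn⟩

-- exact chains: pvChain p r l says l is the walk along parent pointers ending at root r
def pvChain (p : PySem.Dict Int Int) (r : Int) : List Int → Prop
  | [] => False
  | [x] => x = r ∧ p.get? r = some r
  | x :: y :: tl => p.get? x = some y ∧ x ≠ y ∧ pvChain p r (y :: tl)

lemma pvChain_of_R {p : PySem.Dict Int Int} {v r : Int} (h : pvR p v r) :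
    ∃ l, pvChain p r (v :: l) := by
  obtain ⟨n, hn⟩ := h
  induction n generalizing v with
  | zero => simp [pvRootF] at hn
  | succ k ih =>
    cases hg : p.get? v with
    | none => simp [pvRootF, hg] at hn
    | some w =>
      by_cases hw : w = v
      · simp [pvRootF, hg, hw] at hn
        subst hn
        exact ⟨[], ⟨rfl, hw ▸ hg⟩⟩
      · simp only [pvRootF, hg, if_neg hw] at hn
        obtain ⟨l, hl⟩ := ih hn
        exact ⟨w :: l, ⟨hg, fun e => hw e.symm, hl⟩⟩

lemma pvChain_unique {p : PySem.Dict Int Int} {r : Int} :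
    ∀ (l l' : List Int) (x : Int), pvChain p r (x :: l) → pvChain p r (x :: l') → l = l' := by
  intro l
  induction l with
  | nil =>
    intro l' x h h'
    cases l' with
    | nil => rfl
    | cons y tl' =>
      obtain ⟨hx, hroot⟩ := h
      obtain ⟨hg, hne, _⟩ := h'
      subst hx
      rw [hroot] at hg
      exact absurd (Option.some.inj hg) hne
  | cons y tl ih =>
    intro l' x h h'
    cases l' with
    | nil =>
      obtain ⟨hx, hroot⟩ := h'
      obtain ⟨hg, hne, _⟩ := h
      subst hx
      rw [hroot] at hg
      exact absurd (Option.some.inj hg) hne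
    | cons y' tl' =>
      obtain ⟨hg, hne, hch⟩ := h
      obtain ⟨hg', hne', hch'⟩ := h'
      rw [hg] at hg'
      have := Option.some.inj hg'
      subst this
      rw [ih tl' y hch hch']

lemma pvChain_suffix {p : PySem.Dict Int Int} {r : Int} :
    ∀ (l : List Int), pvChain p r l → ∀ x ∈ l, ∃ l2, pvChain p r (x :: l2) ∧ l2.length < l.length := by
  intro l
  induction l with
  | nil => intro _ x hx; simp at hx
  | cons a tl ih =>
    intro h x hx
    rcases List.mem_cons.1 hx with rfl | hx
    · exact ⟨tl, h, by simp⟩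
    · cases tl with
      | nil => simp at hx
      | cons b tl2 =>
        obtain ⟨l2, hl2, hlen⟩ := ih h.2.2 x hx
        exact ⟨l2, hl2, by simp at hlen ⊢; omega⟩

lemma pvChain_nodup {p : PySem.Dict Int Int} {r : Int} :
    ∀ (l : List Int), pvChain p r l → l.Nodup := by
  intro l
  induction l with
  | nil => intro _; exact List.nodup_nil
  | cons a tl ih =>
    intro h
    cases tl with
    | nil => simp
    | cons b tl2 =>
      have htail := ih h.2.2
      refine List.nodup_cons.2 ⟨?_, htail⟩
      intro hmem
      obtain ⟨l2, hl2, hlen⟩ := pvChain_suffix (b :: tl2) h.2.2 a hmem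
      have heq := pvChain_unique (b :: tl2) l2 a h hl2
      rw [← heq] at hlen
      exact absurd hlen (lt_irrefl _)

lemma pvChain_mem_keys {p : PySem.Dict Int Int} {r : Int} :
    ∀ (l : List Int), pvChain p r l → ∀ x ∈ l, (p.get? x).isSome := by
  intro l
  induction l with
  | nil => intro _ x hx; simp at hx
  | cons a tl ih =>
    intro h x hx
    rcases List.mem_cons.1 hx with rfl | hx
    · cases tl with
      | nil => rw [h.1, h.2]; simp
      | cons b tl2 => rw [h.1]; simp
    · cases tl with
      | nil => simp at hx
      | cons b tl2 => exact ih h.2.2 x hx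

lemma pvChain_rootF {p : PySem.Dict Int Int} {r : Int} :
    ∀ (l : List Int) (v : Int), pvChain p r (v :: l) → pvRootF (l.length + 1) p v = some r := by
  intro l
  induction l with
  | nil =>
    intro v h
    obtain ⟨rfl, hroot⟩ := h
    simp [pvRootF, hroot]
  | cons w tl ih =>
    intro v h
    obtain ⟨hg, hne, hch⟩ := h
    have := ih w hch
    simp only [List.length_cons, pvRootF, hg, if_neg (fun e : w = v => hne e.symm)]
    exact this

-- chains visit distinct keys, so fuel size+1 always suffices
lemma pvR_bound {p : PySem.Dict Int Int} {v r : Int} (h : pvR p v r) :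
    pvRootF (p.size + 1) p v = some r := by
  obtain ⟨l, hl⟩ := pvChain_of_R h
  have hnd : (v :: l).Nodup := pvChain_nodup _ hl
  have hsub : (v :: l) ⊆ p.keys := by
    intro x hx
    have := pvChain_mem_keys _ hl x hx
    by_contra hmem
    rw [(PySem.Dict.get?_eq_none_iff_not_mem_keys p x).2 hmem] at this
    simp at this
  have hlen : (v :: l).length ≤ p.keys.length :=
    calc (v :: l).length = (v :: l).toFinset.card := (List.toFinset_card_of_nodup hnd).symm
      _ ≤ p.keys.toFinset.card := Finset.card_le_card
          (fun x hx => List.mem_toFinset.2 (hsub (List.mem_toFinset.1 hx)))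
      _ ≤ p.keys.length := List.toFinset_card_le p.keys
  have hsz : p.keys.length = p.size := by
    simp [PySem.Dict.keys, PySem.Dict.size]
  have hroot := pvChain_rootF l v hl
  exact pvRootF_mono p (l.length + 1) (p.size + 1) v r (by simp at hlen; omega) hroot

-- path compression: redirecting a node to its own root preserves every root
lemma pvR_redirect {p : PySem.Dict Int Int} {v r : Int} (hvr : pvR p v r) :
    ∀ u s, (pvR (p.insert v r) u s ↔ pvR p u s) := by
  have hroot := pvR_root hvr
  intro u s
  constructor
  · rintro ⟨n, hn⟩
    induction n generalizing u with
    | zero => simp [pvRootF] at hn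
    | succ k ih =>
      by_cases huv : u = v
      · have hg : (p.insert v r).get? u = some r := by
          rw [huv]; exact PySem.Dict.get?_insert_self p v r
        rw [pvRootF_succ k hg] at hn
        by_cases hru : r = u
        · rw [if_pos hru] at hn
          have hsu : s = u := (Option.some.inj hn).symm
          have hrv : r = v := by rw [hru, huv]
          rw [hsu, huv]
          exact hrv ▸ hvr
        · rw [if_neg hru] at hn
          have hs2 := ih r hn
          have heq : s = r := pvR_det hs2 (pvR_self hroot)
          rw [heq, huv]; exact hvr
      · have hg : (p.insert v r).get? u = p.get? u := PySem.Dict.get?_insert_of_ne p r huv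
        cases hgu : p.get? u with
        | none => rw [pvRootF_succ_none k (by rw [hg, hgu])] at hn; exact absurd hn (by simp)
        | some w =>
          rw [pvRootF_succ k (show (p.insert v r).get? u = some w by rw [hg, hgu])] at hn
          by_cases hwu : w = u
          · rw [if_pos hwu] at hn
            have hsu : s = u := (Option.some.inj hn).symm
            rw [hsu]
            exact pvR_self (hwu ▸ hgu)
          · rw [if_neg hwu] at hn
            exact (pvR_step hgu hwu).2 (ih w hn)
  · rintro ⟨n, hn⟩
    induction n generalizing u with
    | zero => simp [pvRootF] at hn
    | succ k ih =>
      cases hgu : p.get? u with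
      | none => rw [pvRootF_succ_none k hgu] at hn; exact absurd hn (by simp)
      | some w =>
        rw [pvRootF_succ k hgu] at hn
        by_cases huv : u = v
        · rw [huv]
          have hRu : pvR p v s := ⟨k + 1, by rw [← huv, pvRootF_succ k hgu]; exact hn⟩
          have hsr : s = r := pvR_det hRu hvr
          rw [hsr]
          have hg : (p.insert v r).get? v = some r := PySem.Dict.get?_insert_self p v r
          by_cases hrv : r = v
          · rw [hrv] at hg ⊢
            exact pvR_self hg
          · refine (pvR_step hg hrv).2 ?_
            exact pvR_self (by rw [PySem.Dict.get?_insert_of_ne p r hrv]; exact hroot)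
        · have hg : (p.insert v r).get? u = p.get? u := PySem.Dict.get?_insert_of_ne p r huv
          by_cases hwu : w = u
          · rw [if_pos hwu] at hn
            have hsu : s = u := (Option.some.inj hn).symm
            rw [hsu]
            exact pvR_self (by rw [hg, hgu, hwu])
          · rw [if_neg hwu] at hn
            exact (pvR_step (show (p.insert v r).get? u = some w by rw [hg, hgu]) hwu).2 (ih w hn)

-- pvFindSet computes the root and preserves roots and the key set
lemma pvFindSet_spec {p : PySem.Dict Int Int} {v r : Int} {n : Nat}
    (h : pvRootF n p v = some r) :
    (pvFindSet n p v).1 = r ∧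
    (∀ u s, (pvR (pvFindSet n p v).2 u s ↔ pvR p u s)) ∧
    (∀ u, (((pvFindSet n p v).2).get? u).isSome ↔ (p.get? u).isSome) := by
  induction n generalizing p v r with
  | zero => simp [pvRootF] at h
  | succ k ih =>
    cases hg : p.get? v with
    | none => simp [pvRootF, hg] at h
    | some w =>
      by_cases hw : w = v
      · have hr : r = v := by simp [pvRootF, hg, hw] at h; omega
        subst hr
        exact ⟨by simp [pvFindSet, hg, hw], fun u s => by simp [pvFindSet, hg, hw],
               fun u => by simp [pvFindSet, hg, hw]⟩
      · simp only [pvRootF, hg, if_neg hw] at h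
        obtain ⟨h1, h2, h3⟩ := ih h
        have hRvr : pvR p v r := (pvR_step hg hw).2 ⟨k, h⟩
        have hRvr' : pvR (pvFindSet k p w).2 v r := (h2 v r).2 hRvr
        refine ⟨?_, ?_, ?_⟩
        · simp [pvFindSet, hg, if_neg hw, h1]
        · intro u s
          simp only [pvFindSet, hg, if_neg hw]
          rw [h1]
          exact (pvR_redirect hRvr' u s).trans (h2 u s)
        · intro u
          simp only [pvFindSet, hg, if_neg hw]
          rw [h1]
          by_cases huv : u = v
          · rw [huv, PySem.Dict.get?_insert_self, hg]; simp
          · rw [PySem.Dict.get?_insert_of_ne _ r huv]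
            exact h3 u

-- adding a fresh self-looped node
lemma pvR_addKey {p : PySem.Dict Int Int} {v : Int} (hv : p.get? v = none)
    (hF : ∀ x, (p.get? x).isSome → ∃ r, pvR p x r) :
    ∀ u s, (pvR (p.insert v v) u s ↔ ((u = v ∧ s = v) ∨ pvR p u s)) := by
  intro u s
  constructor
  · rintro ⟨n, hn⟩
    induction n generalizing u with
    | zero => simp [pvRootF] at hn
    | succ k ih =>
      by_cases huv : u = v
      · have hg : (p.insert v v).get? u = some v := by
          rw [huv]; exact PySem.Dict.get?_insert_self p v v
        rw [pvRootF_succ k hg, if_pos huv.symm] at hn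
        have hsu : s = u := (Option.some.inj hn).symm
        exact Or.inl ⟨huv, by rw [hsu, huv]⟩
      · have hg : (p.insert v v).get? u = p.get? u := PySem.Dict.get?_insert_of_ne p v huv
        cases hgu : p.get? u with
        | none => rw [pvRootF_succ_none k (by rw [hg, hgu])] at hn; exact absurd hn (by simp)
        | some w =>
          rw [pvRootF_succ k (show (p.insert v v).get? u = some w by rw [hg, hgu])] at hn
          by_cases hwu : w = u
          · rw [if_pos hwu] at hn
            have hsu : s = u := (Option.some.inj hn).symm
            exact Or.inr (by rw [hsu]; exact pvR_self (hwu ▸ hgu))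
          · rw [if_neg hwu] at hn
            rcases ih w hn with ⟨hwv, hsv⟩ | hR
            · obtain ⟨ρ, hρ⟩ := hF u (by rw [hgu]; simp)
              have h2 := (pvR_step hgu hwu).1 hρ
              have h3 := pvR_mem h2
              rw [hwv, hv] at h3
              exact absurd h3 (by simp)
            · exact Or.inr ((pvR_step hgu hwu).2 hR)
  · rintro (⟨huv, hsv⟩ | hR)
    · rw [huv, hsv]
      exact pvR_self (PySem.Dict.get?_insert_self p v v)
    · obtain ⟨n, hn⟩ := hR
      refine ⟨n, ?_⟩
      induction n generalizing u with
      | zero => simp [pvRootF] at hn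
      | succ k ih =>
        cases hgu : p.get? u with
        | none => rw [pvRootF_succ_none k hgu] at hn; exact absurd hn (by simp)
        | some w =>
          rw [pvRootF_succ k hgu] at hn
          have huv : u ≠ v := by
            intro e; rw [e, hv] at hgu; exact absurd hgu (by simp)
          have hg : (p.insert v v).get? u = some w := by
            rw [PySem.Dict.get?_insert_of_ne p v huv, hgu]
          rw [pvRootF_succ k hg]
          by_cases hwu : w = u
          · rw [if_pos hwu] at hn ⊢; exact hn
          · rw [if_neg hwu] at hn ⊢
            exact ih w hn

-- linking root tgt under root src
lemma pvR_link {p : PySem.Dict Int Int} {src tgt : Int}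
    (hs : p.get? src = some src) (ht : p.get? tgt = some tgt) (hne : src ≠ tgt) :
    ∀ u s', (pvR (p.insert tgt src) u s' ↔
      ∃ ρ, pvR p u ρ ∧ s' = (if ρ = tgt then src else ρ)) := by
  have hs' : (p.insert tgt src).get? src = some src := by
    rw [PySem.Dict.get?_insert_of_ne p src hne]; exact hs
  have ht' : (p.insert tgt src).get? tgt = some src := PySem.Dict.get?_insert_self p tgt src
  intro u s'
  constructor
  · rintro ⟨n, hn⟩
    induction n generalizing u with
    | zero => simp [pvRootF] at hn
    | succ k ih =>
      by_cases hut : u = tgt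
      · rw [hut] at hn ⊢
        rw [pvRootF_succ k ht', if_neg hne] at hn
        have hrec : pvR (p.insert tgt src) src s' := ⟨k, hn⟩
        have hss : s' = src := pvR_det hrec (pvR_self hs')
        exact ⟨tgt, pvR_self ht, by simp [hss]⟩
      · have hg : (p.insert tgt src).get? u = p.get? u := PySem.Dict.get?_insert_of_ne p src hut
        cases hgu : p.get? u with
        | none => rw [pvRootF_succ_none k (by rw [hg, hgu])] at hn; exact absurd hn (by simp)
        | some w =>
          rw [pvRootF_succ k (show (p.insert tgt src).get? u = some w by rw [hg, hgu])] at hn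
          by_cases hwu : w = u
          · rw [if_pos hwu] at hn
            have hsu : s' = u := (Option.some.inj hn).symm
            exact ⟨u, pvR_self (hwu ▸ hgu), by rw [if_neg hut, hsu]⟩
          · rw [if_neg hwu] at hn
            obtain ⟨ρ, hρ, hseq⟩ := ih w hn
            exact ⟨ρ, (pvR_step hgu hwu).2 hρ, hseq⟩
  · rintro ⟨ρ, hρ, hseq⟩
    subst hseq
    obtain ⟨n, hn⟩ := hρ
    induction n generalizing u with
    | zero => simp [pvRootF] at hn
    | succ k ih =>
      cases hgu : p.get? u with
      | none => rw [pvRootF_succ_none k hgu] at hn; exact absurd hn (by simp)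
      | some w =>
        rw [pvRootF_succ k hgu] at hn
        by_cases hut : u = tgt
        · have hw : w = tgt := by rw [hut, ht] at hgu; exact (Option.some.inj hgu).symm
          have hρt : ρ = tgt := by
            rw [if_pos (by rw [hw, hut]), hut] at hn
            exact (Option.some.inj hn).symm
          rw [hρt, if_pos rfl, hut]
          exact (pvR_step ht' hne).2 (pvR_self hs')
        · have hg : (p.insert tgt src).get? u = some w := by
            rw [PySem.Dict.get?_insert_of_ne p src hut, hgu]
          by_cases hwu : w = u
          · rw [if_pos hwu] at hn
            have hρu : ρ = u := (Option.some.inj hn).symm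
            rw [hρu, if_neg hut]
            exact pvR_self (by rw [hg, hwu])
          · rw [if_neg hwu] at hn
            exact (pvR_step hg hwu).2 (ih w hn)

-- the simulation invariant: B's comp maps every node to its A-forest root
def pvINV (p c : PySem.Dict Int Int) : Prop :=
  (∀ v r, (c.get? v = some r ↔ pvR p v r)) ∧
  (∀ v, (p.get? v).isSome → (c.get? v).isSome)

lemma pvINV_forest {p c : PySem.Dict Int Int} (h : pvINV p c) :
    ∀ x, (p.get? x).isSome → ∃ r, pvR p x r := by
  intro x hx
  obtain ⟨r, hr⟩ := Option.isSome_iff_exists.1 (h.2 x hx)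
  exact ⟨r, (h.1 x r).1 hr⟩

lemma pvContains_eq {p c : PySem.Dict Int Int} (h : pvINV p c) (v : Int) :
    p.contains v = c.contains v := by
  rw [PySem.Dict.contains_eq_isSome_get?, PySem.Dict.contains_eq_isSome_get?]
  cases hc : c.get? v with
  | some r =>
    have := pvR_mem ((h.1 v r).1 hc)
    simp [this]
  | none =>
    simp only [Option.isSome_none]
    cases hp : p.get? v with
    | none => simp
    | some w =>
      have := h.2 v (by rw [hp]; simp)
      rw [hc] at this; simp at this

lemma pvRelabel_get? (c : PySem.Dict Int Int) (t s u : Int) :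
    (pvRelabel c t s).get? u = (c.get? u).map (fun x => if x = t then s else x) := by
  simp only [pvRelabel, PySem.Dict.get?, List.find?_map]
  have hco : (fun (p : Int × Int) => p.1 == u) ∘ (fun kv : Int × Int => (kv.1, if kv.2 == t then s else kv.2))
      = fun (p : Int × Int) => p.1 == u := by
    funext kv; rfl
  rw [hco]
  cases List.find? (fun (p : Int × Int) => p.1 == u) c.items with
  | none => rfl
  | some kv =>
    simp only [Option.map_some]
    by_cases h2 : kv.2 = t <;> simp [h2]

lemma pvMakeSet_sim {p c : PySem.Dict Int Int} (h : pvINV p c) (s : PySem.Dict Int Int) (v : Int) :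
    pvINV (pvMakeSet p s v).1 (pvRegister c s v).1 ∧
    (pvMakeSet p s v).2 = (pvRegister c s v).2 ∧
    (∀ u, (((pvMakeSet p s v).1).get? u).isSome ↔ ((p.get? u).isSome ∨ u = v)) := by
  unfold pvMakeSet pvRegister
  rw [pvContains_eq h v]
  by_cases hc : c.contains v = true
  · simp only [if_pos hc]
    refine ⟨h, by trivial, fun u => ?_⟩
    constructor
    · exact fun hu => Or.inl hu
    · rintro (hu | rfl)
      · exact hu
      · rw [← PySem.Dict.contains_eq_isSome_get?, pvContains_eq h u]; exact hc
  · simp only [if_neg hc]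
    have hv : p.get? v = none := by
      have : p.contains v = false := by rw [pvContains_eq h v]; simpa using hc
      rw [PySem.Dict.contains_eq_isSome_get?] at this
      exact Option.not_isSome_iff_eq_none.1 (by simp [this])
    have hcv : c.get? v = none := by
      have : c.contains v = false := by simpa using hc
      rw [PySem.Dict.contains_eq_isSome_get?] at this
      exact Option.not_isSome_iff_eq_none.1 (by simp [this])
    have hadd := pvR_addKey hv (pvINV_forest h)
    refine ⟨⟨fun u r => ?_, fun u hu => ?_⟩, by trivial, fun u => ?_⟩
    · rw [PySem.Dict.get?_insert, hadd u r]
      by_cases huv : u = v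
      · subst huv
        rw [if_pos rfl]
        constructor
        · intro e; exact Or.inl ⟨by trivial, (Option.some.inj e).symm⟩
        · rintro (⟨-, rfl⟩ | hR)
          · rfl
          · exact absurd (pvR_mem hR) (by rw [hv]; simp)
      · simp only [if_neg huv]
        rw [h.1 u r]
        constructor
        · exact fun hR => Or.inr hR
        · rintro (⟨rfl, -⟩ | hR)
          · exact absurd rfl huv
          · exact hR
    · rw [PySem.Dict.get?_insert] at hu ⊢
      by_cases huv : u = v
      · simp [huv]
      · rw [if_neg huv] at hu ⊢
        exact h.2 u hu
    · rw [PySem.Dict.get?_insert]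
      by_cases huv : u = v
      · simp [huv]
      · simp only [if_neg huv]
        constructor
        · exact fun hu => Or.inl hu
        · rintro (hu | rfl)
          · exact hu
          · exact absurd rfl huv

lemma pvStep_sim {p c s : PySem.Dict Int Int} {m : Int} {out : List Int}
    (h : pvINV p c) (q : List Int) :
    pvINV (pvStepA ((p, s, m), out) q).1.1 (pvStepB ((c, s, m), out) q).1.1 ∧
    (pvStepA ((p, s, m), out) q).1.2 = (pvStepB ((c, s, m), out) q).1.2 ∧
    (pvStepA ((p, s, m), out) q).2 = (pvStepB ((c, s, m), out) q).2 := by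
  match q with
  | [] => exact ⟨h, rfl, rfl⟩
  | [_] => exact ⟨h, rfl, rfl⟩
  | (_ :: _ :: _ :: _) => exact ⟨h, rfl, rfl⟩
  | [a, b] =>
    obtain ⟨h1, hs1, hk1⟩ := pvMakeSet_sim h s a
    obtain ⟨h2, hs2, hk2⟩ := pvMakeSet_sim h1 (pvMakeSet p s a).2 b
    simp only [pvStepA, pvStepB, pvUnionA]
    rw [← hs1, ← hs2]
    set X := (pvMakeSet (pvMakeSet p s a).1 (pvMakeSet p s a).2 b).1 with hX
    set C2 := (pvRegister (pvRegister c s a).1 (pvMakeSet p s a).2 b).1 with hC2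
    set S2 := (pvMakeSet (pvMakeSet p s a).1 (pvMakeSet p s a).2 b).2 with hS2
    have hpa : (X.get? a).isSome := (hk2 a).2 (Or.inl ((hk1 a).2 (Or.inr rfl)))
    have hpb : (X.get? b).isSome := (hk2 b).2 (Or.inr rfl)
    obtain ⟨ra, hca⟩ := Option.isSome_iff_exists.1 (h2.2 a hpa)
    obtain ⟨rb, hcb⟩ := Option.isSome_iff_exists.1 (h2.2 b hpb)
    have hRa := (h2.1 a ra).1 hca
    have hRb := (h2.1 b rb).1 hcb
    obtain ⟨hf1, hf2, hf3⟩ := pvFindSet_spec (pvR_bound hRa)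
    set P3 := (pvFindSet (X.size + 1) X a).2 with hP3
    have hRb3 := (hf2 b rb).2 hRb
    obtain ⟨hg1, hg2, hg3⟩ := pvFindSet_spec (pvR_bound hRb3)
    set P4 := (pvFindSet (P3.size + 1) P3 b).2 with hP4
    rw [hf1, hg1, PySem.Dict.getD_of_get?_eq_some _ 0 hca, PySem.Dict.getD_of_get?_eq_some _ 0 hcb]
    have hINV4 : pvINV P4 C2 := by
      refine ⟨fun u r => ?_, fun u hu => ?_⟩
      · exact ((h2.1 u r).trans (hf2 u r).symm).trans (hg2 u r).symm
      · exact h2.2 u ((hf3 u).1 ((hg3 u).1 hu))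
    have hRa4 : pvR P4 a ra := (hg2 a ra).2 ((hf2 a ra).2 hRa)
    have hRb4 : pvR P4 b rb := (hg2 b rb).2 hRb3
    have hrootA : P4.get? ra = some ra := pvR_root hRa4
    have hrootB : P4.get? rb = some rb := pvR_root hRb4
    by_cases hrr : ra = rb
    · rw [if_neg (not_not_intro hrr), if_neg (not_not_intro hrr)]
      exact ⟨hINV4, rfl, rfl⟩
    · rw [if_pos hrr, if_pos hrr]
      set WL := if S2.getD ra 0 < S2.getD rb 0 then (rb, ra) else (ra, rb) with hWL
      have hWLp : (P4.get? WL.1 = some WL.1) ∧ (P4.get? WL.2 = some WL.2) ∧ WL.1 ≠ WL.2 := by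
        by_cases hlt : S2.getD ra 0 < S2.getD rb 0 <;>
          simp [hWL, hlt, hrootA, hrootB, hrr, Ne.symm hrr]
      have hlink := pvR_link hWLp.1 hWLp.2.1 hWLp.2.2
      refine ⟨⟨fun u ρ' => ?_, fun u hu => ?_⟩, rfl, rfl⟩
      · rw [pvRelabel_get?, hlink u ρ']
        cases hcu : C2.get? u with
        | none =>
          simp only [Option.map_none]
          constructor
          · intro hh; exact absurd hh (by simp)
          · rintro ⟨ρ, hρ, -⟩
            rw [(hINV4.1 u ρ).2 hρ] at hcu
            exact absurd hcu (by simp)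
        | some ρ =>
          simp only [Option.map_some]
          have hρP : pvR P4 u ρ := (hINV4.1 u ρ).1 hcu
          constructor
          · intro he
            exact ⟨ρ, hρP, (Option.some.inj he).symm⟩
          · rintro ⟨ρ2, hρ2, he⟩
            have hee : ρ2 = ρ := pvR_det hρ2 hρP
            rw [he, hee]
      · rw [pvRelabel_get?]
        rw [PySem.Dict.get?_insert] at hu
        by_cases hul : u = WL.2
        · have hcl : C2.get? WL.2 = some WL.2 := (hINV4.1 _ _).2 (pvR_self hWLp.2.1)
          rw [hul, hcl]; simp
        · rw [if_neg hul] at hu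
          have hsome := hINV4.2 u hu
          cases hcu : C2.get? u with
          | none => simp [hcu] at hsome
          | some ρ => simp

lemma pvINV_empty : pvINV PySem.Dict.empty PySem.Dict.empty := by
  constructor
  · intro v r
    constructor
    · intro hg; rw [PySem.Dict.get?_empty] at hg; exact absurd hg (by simp)
    · rintro ⟨n, hn⟩
      cases n with
      | zero => simp [pvRootF] at hn
      | succ k => simp [pvRootF, PySem.Dict.get?_empty] at hn
  · intro v hv; rw [PySem.Dict.get?_empty] at hv; simp at hv

lemma pvFold_sim : ∀ (qs : List (List Int)) (p c s : PySem.Dict Int Int) (m : Int)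
    (out : List Int), pvINV p c →
    (qs.foldl pvStepA ((p, s, m), out)).2 = (qs.foldl pvStepB ((c, s, m), out)).2 := by
  intro qs
  induction qs with
  | nil => intro p c s m out _; rfl
  | cons q qs ih =>
    intro p c s m out h
    obtain ⟨hI, hsm, hout⟩ := pvStep_sim h q
    simp only [List.foldl_cons]
    rcases hA : pvStepA ((p, s, m), out) q with ⟨⟨p1, s1, m1⟩, o1⟩
    rcases hB : pvStepB ((c, s, m), out) q with ⟨⟨c1, z1, b1⟩, o2⟩
    rw [hA, hB] at hI hsm hout
    simp only at hI hsm hout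
    injection hsm with hz hb
    subst hz
    subst hb
    subst hout
    exact ih p1 c1 s1 m1 o1 hI

-- ===== VERDICT (by name: the statement is the Claim_ definition above) =====
theorem maxCircle_spec : Claim_equal_maxCircle := by
  intro queries _ _
  unfold Spec_maxCircle maxCircle maxCircle_alt
  exact pvFold_sim queries _ _ _ _ _ pvINV_empty
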